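-- pv_equiv track=rewrite | github.com/JVTannus/EP2 | funcoes.py | calcula_pontos_quadra
-- ===== SOURCE A (Python) =====
-- def calcula_pontos_quadra(dados):
--     frequencias = {}
--     total = 0
--
--     for dado in dados:
--         total += dado
--         if dado in frequencias:
--             frequencias[dado] += 1
--         else:
--             frequencias[dado] = 1
--
--     for chave in frequencias:
--         if frequencias[chave] >= 4:
--             return total
--     return 0
-- ===== SOURCE B (Python) =====
-- def calcula_pontos_quadra(dados):
--     total = sum(dados)
--     valores = sorted(dados)
--     if not valores:
--         return 0
--     prev = valores[0]
--     run = 1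
--     for x in valores[1:]:
--         if x == prev:
--             run += 1
--             if run >= 4:
--                 return total
--         else:
--             run = 1
--         prev = x
--     return 0
-- ===== Notes on version B (the rewrite author's own statement) =====
-- stated objective: alternative
-- what changed: Replaces the hash-map frequency table and key scan with a single sum plus sort-then-run-length scan over the sorted copy, returning the total as soon as a run of equal consecutive values reaches 4.
import Mathlib
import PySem

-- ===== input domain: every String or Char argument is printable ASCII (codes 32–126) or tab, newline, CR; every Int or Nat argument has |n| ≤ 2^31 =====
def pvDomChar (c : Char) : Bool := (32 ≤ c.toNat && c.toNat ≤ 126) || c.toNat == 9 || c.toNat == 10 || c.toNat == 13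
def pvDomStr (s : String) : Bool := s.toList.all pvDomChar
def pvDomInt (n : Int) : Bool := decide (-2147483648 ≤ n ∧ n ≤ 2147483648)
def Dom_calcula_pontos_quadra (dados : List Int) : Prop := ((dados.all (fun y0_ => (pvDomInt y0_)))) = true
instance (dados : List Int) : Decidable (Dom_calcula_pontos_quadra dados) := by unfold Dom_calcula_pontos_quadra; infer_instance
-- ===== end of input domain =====

-- B replaces A's hash-map frequency table with sum + sort + run-length scan; return values only (neither mutates its argument).

-- ===== PORT A =====
-- second loop of A: for chave in frequencias: if frequencias[chave] >= 4: return total / return 0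
def pvLoopA (freq : PySem.Dict Int Int) (total : Int) : List Int → Int
  | [] => 0
  | k :: ks => if 4 ≤ freq.getD k 0 then total else pvLoopA freq total ks

def calcula_pontos_quadra (dados : List Int) : Int :=
  let st := dados.foldl
    (fun (st : PySem.Dict Int Int × Int) dado =>
      let total := st.2 + dado
      let freq := if st.1.contains dado then st.1.insert dado (st.1.getD dado 0 + 1)
                  else st.1.insert dado 1
      (freq, total))
    (PySem.Dict.empty, 0)
  pvLoopA st.1 st.2 st.1.keys

-- ===== PORT B =====
-- scan of the sorted copy: prev, current run length, remaining elements
def pvHasRun4 (prev run : Int) : List Int → Bool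
  | [] => false
  | x :: rest =>
      if x = prev then (if 4 ≤ run + 1 then true else pvHasRun4 x (run + 1) rest)
      else pvHasRun4 x 1 rest

def calcula_pontos_quadra_alt (dados : List Int) : Int :=
  let total := dados.sum
  match PySem.List.sorted dados (fun x => x) false with
  | [] => 0
  | h :: t => if pvHasRun4 h 1 t then total else 0

-- ===== PRECONDITION & SPEC =====
def Spec_calcula_pontos_quadra (dados : List Int) (out : Int) : Prop := out = calcula_pontos_quadra_alt dados
instance (dados : List Int) (out : Int) : Decidable (Spec_calcula_pontos_quadra dados out) := by unfold Spec_calcula_pontos_quadra; infer_instance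

-- ===== CLAIM (what is proved, stated in full; the proofs are below) =====
def Claim_equal_calcula_pontos_quadra : Prop := ∀ (dados : List Int), Dom_calcula_pontos_quadra dados → Spec_calcula_pontos_quadra dados (calcula_pontos_quadra dados)

-- ===== LEMMAS AND PROOFS =====

-- A's pair fold splits into the counter fold and the running sum
theorem pvFoldA_eq (l : List Int) (d : PySem.Dict Int Int) (t : Int) :
    l.foldl
      (fun (st : PySem.Dict Int Int × Int) dado =>
        let total := st.2 + dado
        let freq := if st.1.contains dado then st.1.insert dado (st.1.getD dado 0 + 1)
                    else st.1.insert dado 1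
        (freq, total))
      (d, t)
    = (l.foldl (fun d x => d.insert x (d.getD x 0 + 1)) d, t + l.sum) := by
  induction l generalizing d t with
  | nil => simp
  | cons x xs ih =>
      simp only [List.foldl_cons, List.sum_cons]
      have hins : (if d.contains x = true then d.insert x (d.getD x 0 + 1) else d.insert x 1)
          = d.insert x (d.getD x 0 + 1) := by
        by_cases h : d.contains x = true
        · rw [if_pos h]
        · rw [if_neg h, PySem.Dict.getD_of_not_contains d 0 (by simpa using h)]
          norm_num
      rw [hins, ih, add_assoc]

theorem pvLoopA_eq (freq : PySem.Dict Int Int) (total : Int) (ks : List Int) :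
    pvLoopA freq total ks = if ∃ k ∈ ks, 4 ≤ freq.getD k 0 then total else 0 := by
  induction ks with
  | nil => simp [pvLoopA]
  | cons k ks ih =>
      simp only [pvLoopA, ih]
      by_cases h : 4 ≤ freq.getD k 0
      · rw [if_pos h, if_pos ⟨k, List.mem_cons_self, h⟩]
      · rw [if_neg h]
        by_cases h2 : ∃ j ∈ ks, 4 ≤ freq.getD j 0
        · rcases h2 with ⟨j, hj, h4⟩
          rw [if_pos ⟨j, hj, h4⟩, if_pos ⟨j, List.mem_cons_of_mem _ hj, h4⟩]
        · rw [if_neg h2, if_neg]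
          rintro ⟨j, hj, h4⟩
          rcases List.mem_cons.mp hj with rfl | hj2
          · exact h h4
          · exact h2 ⟨j, hj2, h4⟩

-- invariant of B's run scan on a sorted suffix
theorem pvHasRun4_iff (rest : List Int) (prev run : Int)
    (hs : rest.Pairwise (· ≤ ·)) (hle : ∀ y ∈ rest, prev ≤ y) :
    pvHasRun4 prev run rest = true ↔
      (4 ≤ run + (rest.count prev : Int) ∧ prev ∈ rest) ∨
      ∃ x ∈ rest, x ≠ prev ∧ 4 ≤ rest.count x := by
  induction rest generalizing prev run with
  | nil => simp [pvHasRun4]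
  | cons x t ih =>
      rcases List.pairwise_cons.mp hs with ⟨hxle, hst⟩
      by_cases hx : x = prev
      · subst hx
        simp only [pvHasRun4, if_true]
        by_cases hr : (4 : Int) ≤ run + 1
        · rw [if_pos hr]
          constructor
          · intro _
            exact Or.inl ⟨by rw [List.count_cons_self]; push_cast; omega, List.mem_cons_self⟩
          · intro _; rfl
        · rw [if_neg hr, ih x (run + 1) hst hxle]
          constructor
          · rintro (⟨h1, _⟩ | ⟨y, hy, hne, hc⟩)
            · exact Or.inl ⟨by rw [List.count_cons_self]; push_cast at h1 ⊢; omega,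
                List.mem_cons_self⟩
            · exact Or.inr ⟨y, List.mem_cons_of_mem _ hy, hne,
                by rwa [List.count_cons_of_ne (Ne.symm hne)]⟩
          · rintro (⟨h1, _⟩ | ⟨y, hy, hne, hc⟩)
            · rw [List.count_cons_self] at h1
              have hc1 : 1 ≤ t.count x := by push_cast at h1; omega
              exact Or.inl ⟨by push_cast at h1 ⊢; omega, List.count_pos_iff.mp (by omega)⟩
            · rcases List.mem_cons.mp hy with rfl | hyt
              · exact absurd rfl hne
              · exact Or.inr ⟨y, hyt, hne,
                  by rwa [List.count_cons_of_ne (Ne.symm hne)] at hc⟩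
      · -- x ≠ prev; since prev ≤ x ≤ everything in t, prev ∉ x :: t
        have hpx : prev < x := lt_of_le_of_ne (hle x List.mem_cons_self) (fun he => hx he.symm)
        have hnot : prev ∉ x :: t := by
          intro hmem
          rcases List.mem_cons.mp hmem with rfl | hmt
          · exact hx rfl
          · exact absurd (lt_of_lt_of_le hpx (hxle _ hmt)) (lt_irrefl _)
        simp only [pvHasRun4]
        rw [if_neg hx, ih x 1 hst hxle]
        constructor
        · rintro (⟨h1, h2⟩ | ⟨y, hy, hne, hc⟩)
          · refine Or.inr ⟨x, List.mem_cons_self, hx, ?_⟩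
            rw [List.count_cons_self]
            omega
          · refine Or.inr ⟨y, List.mem_cons_of_mem _ hy,
              fun h => hnot (h ▸ List.mem_cons_of_mem _ hy), ?_⟩
            rwa [List.count_cons_of_ne (Ne.symm hne)]
        · rintro (⟨_, h2⟩ | ⟨y, hy, hne, hc⟩)
          · exact absurd h2 hnot
          · rcases List.mem_cons.mp hy with rfl | hyt
            · rw [List.count_cons_self] at hc
              by_cases hyt2 : y ∈ t
              · exact Or.inl ⟨by omega, hyt2⟩
              · rw [List.count_eq_zero_of_not_mem hyt2] at hc; omega
            · by_cases hyx : y = x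
              · subst hyx
                rw [List.count_cons_self] at hc
                exact Or.inl ⟨by omega, List.count_pos_iff.mp (by omega)⟩
              · exact Or.inr ⟨y, hyt, hyx,
                  by rwa [List.count_cons_of_ne (Ne.symm hyx)] at hc⟩

-- B returns the sum iff some value occurs ≥ 4 times
theorem alt_char (dados : List Int) :
    calcula_pontos_quadra_alt dados
      = if ∃ x ∈ dados, 4 ≤ dados.count x then dados.sum else 0 := by
  unfold calcula_pontos_quadra_alt
  have hperm := PySem.List.sorted_perm dados (fun x => x) false
  have hpw := PySem.List.sorted_pairwise dados (fun x => x)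
  cases hsort : PySem.List.sorted dados (fun x => x) false with
  | nil =>
      rw [hsort] at hperm
      have hnil : dados = [] := hperm.nil_eq.symm
      simp [hnil]
  | cons h t =>
      rw [hsort] at hperm hpw
      rcases List.pairwise_cons.mp hpw with ⟨hhle, hst⟩
      have hcount : ∀ x : Int, dados.count x = (h :: t).count x := fun x => (hperm.count_eq x).symm
      have hmem : ∀ x : Int, x ∈ dados ↔ x ∈ h :: t := fun x => hperm.mem_iff.symm
      have hrun := pvHasRun4_iff t h 1 hst hhle
      by_cases hex : ∃ x ∈ dados, 4 ≤ dados.count x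
      · rw [if_pos hex]
        rcases hex with ⟨x, hx, hc⟩
        rw [hmem x] at hx; rw [hcount x] at hc
        have htr : pvHasRun4 h 1 t = true := by
          rw [hrun]
          by_cases hxh : x = h
          · subst hxh
            rw [List.count_cons_self] at hc
            exact Or.inl ⟨by omega, List.count_pos_iff.mp (by omega)⟩
          · rcases List.mem_cons.mp hx with rfl | hxt
            · exact absurd rfl hxh
            · exact Or.inr ⟨x, hxt, hxh,
                by rwa [List.count_cons_of_ne (Ne.symm hxh)] at hc⟩
        simp [htr]
      · rw [if_neg hex]
        have hfa : pvHasRun4 h 1 t = false := by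
          rw [Bool.eq_false_iff]
          intro htrue
          rcases hrun.mp htrue with ⟨h1, _⟩ | ⟨y, hy, hne, hc⟩
          · exact hex ⟨h, (hmem h).mpr List.mem_cons_self,
              by rw [hcount h, List.count_cons_self]; push_cast at h1 ⊢; omega⟩
          · exact hex ⟨y, (hmem y).mpr (List.mem_cons_of_mem _ hy),
              by rw [hcount y, List.count_cons_of_ne (Ne.symm hne)]; exact_mod_cast hc⟩
        simp [hfa]

-- ===== VERDICT (by name: the statement is the Claim_ definition above) =====
theorem calcula_pontos_quadra_spec : Claim_equal_calcula_pontos_quadra := by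
  intro dados _
  unfold Spec_calcula_pontos_quadra calcula_pontos_quadra
  rw [pvFoldA_eq, alt_char]
  simp only [zero_add]
  rw [PySem.Dict.foldl_insert_getD_add_one_eq_counter, pvLoopA_eq]
  congr 1
  simp only [PySem.Dict.getD_counter, PySem.Dict.keys_counter, eq_iff_iff]
  constructor
  · rintro ⟨k, hk, h4⟩
    exact ⟨k, (PySem.Set.mem_ofList _ _).mp hk, by exact_mod_cast h4⟩
  · rintro ⟨k, hk, h4⟩
    exact ⟨k, (PySem.Set.mem_ofList _ _).mpr hk, by exact_mod_cast h4⟩
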